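-- pv_equiv track=rewrite | github.com/hotosm/field-tm | src/qfield/drone_project.py | _strip_common_prefix
-- ===== SOURCE A (Python) =====
-- def _strip_common_prefix(filename: str, all_names: list[str]) -> str:
--     """If every entry in the zip shares a single top-level directory, strip it.
--
--     This handles both flat zips (files at root) and wrapped zips
--     (everything under one directory like ``qfield-plugin/``).
--     """
--     parts = [n for n in all_names if not n.endswith("/")]
--     if not parts:
--         return filename
--     first_dirs = {p.split("/", 1)[0] for p in parts if "/" in p}
--     roots_without_dir = {p for p in parts if "/" not in p}
--     # Only strip if every file is under exactly one common directory
--     if len(first_dirs) == 1 and not roots_without_dir: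
--         common = first_dirs.pop() + "/"
--         if filename.startswith(common):
--             return filename[len(common):]
--     return filename
-- ===== SOURCE B (Python) =====
-- def _strip_common_prefix(filename: str, all_names: list[str]) -> str:
--     """If every entry shares a single top-level directory, strip it.
--
--     Instead of splitting each name and comparing first components, compute the
--     character-wise longest common prefix of all non-directory entries; the zip
--     has a single common top-level directory exactly when that prefix contains
--     a '/' (everything up to and including the first '/' is the shared root).
--     """
--     parts = [n for n in all_names if not n.endswith("/")]
--     if not parts:
--         return filename
--     cp = parts[0]
--     for p in parts[1:]:
--         j = 0
--         k = min(len(cp), len(p))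
--         while j < k and cp[j] == p[j]:
--             j += 1
--         cp = cp[:j]
--     i = cp.find("/")
--     if i != -1:
--         common = cp[:i + 1]
--         if filename.startswith(common):
--             return filename[len(common):]
--     return filename
-- ===== Notes on version B (the rewrite author's own statement) =====
-- stated objective: alternative
-- what changed: B never splits names into components or builds sets: it computes the character-wise longest common prefix of the non-directory entries and strips everything up to its first '/', which exists exactly when all entries share one top-level directory.
import Mathlib
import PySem

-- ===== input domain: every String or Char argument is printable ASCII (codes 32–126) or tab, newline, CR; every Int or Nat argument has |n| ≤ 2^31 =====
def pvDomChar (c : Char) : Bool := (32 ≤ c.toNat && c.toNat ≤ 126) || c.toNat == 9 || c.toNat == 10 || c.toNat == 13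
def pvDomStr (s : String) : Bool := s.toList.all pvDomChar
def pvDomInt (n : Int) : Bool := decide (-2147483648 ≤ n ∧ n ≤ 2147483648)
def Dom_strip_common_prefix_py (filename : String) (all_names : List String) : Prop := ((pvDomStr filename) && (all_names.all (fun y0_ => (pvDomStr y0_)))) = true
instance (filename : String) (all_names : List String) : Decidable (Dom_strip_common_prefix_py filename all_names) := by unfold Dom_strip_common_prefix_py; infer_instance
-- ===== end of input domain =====

-- B decides strippability by the character-wise longest common prefix of the
-- non-directory entries (they share one top-level directory iff that prefix
-- contains '/'), instead of A's per-name split plus two set comprehensions.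

-- ===== PORT A =====
def strip_common_prefix_py (filename : String) (all_names : List String) : String :=
  let parts := all_names.filter (fun n => !(PySem.Str.endswith n "/"))
  if parts = [] then filename
  else
    let first_dirs : PySem.Set String :=
      PySem.Set.ofList ((parts.filter (fun p => PySem.Str.isIn "/" p)).map
        (fun p => ((PySem.Str.splitMax? p "/" 1).getD []).headD ""))
    let roots_without_dir : PySem.Set String :=
      PySem.Set.ofList (parts.filter (fun p => !(PySem.Str.isIn "/" p)))
    if PySem.Set.len first_dirs = 1 ∧ roots_without_dir = [] then
      -- first_dirs.pop() on the (proved) singleton set is its only element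
      let common := first_dirs.headD "" ++ "/"
      if PySem.Str.startswith filename common then
        PySem.Str.slice filename (some (PySem.Str.len common)) none
      else filename
    else filename

-- ===== PORT B =====
-- the inner while-loop of Source B: advance j while the characters agree, then cp[:j]
def pvLcp : List Char → List Char → List Char
  | x :: xs, y :: ys => if x = y then x :: pvLcp xs ys else []
  | _, _ => []

def strip_common_prefix_py_alt (filename : String) (all_names : List String) : String :=
  let parts := all_names.filter (fun n => !(PySem.Str.endswith n "/"))
  match parts with
  | [] => filename
  | p0 :: rest =>
    let cp := rest.foldl (fun cp p => String.ofList (pvLcp cp.toList p.toList)) p0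
    let i := PySem.Str.find cp "/"
    if i != -1 then
      let common := PySem.Str.slice cp none (some (i + 1))
      if PySem.Str.startswith filename common then
        PySem.Str.slice filename (some (PySem.Str.len common)) none
      else filename
    else filename

-- ===== PRECONDITION & SPEC =====
def Spec_strip_common_prefix_py (filename : String) (all_names : List String) (out : String) : Prop := out = strip_common_prefix_py_alt filename all_names
instance (filename : String) (all_names : List String) (out : String) : Decidable (Spec_strip_common_prefix_py filename all_names out) := by unfold Spec_strip_common_prefix_py; infer_instance

-- ===== CLAIM (what is proved, stated in full; the proofs are below) =====
def Claim_equal_strip_common_prefix_py : Prop := ∀ (filename : String) (all_names : List String), Dom_strip_common_prefix_py filename all_names → Spec_strip_common_prefix_py filename all_names (strip_common_prefix_py filename all_names)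

-- ===== LEMMAS AND PROOFS =====

-- the canonical top-level component of a name containing '/'
def pvTop (s : String) : String := String.ofList (s.toList.takeWhile (· ≠ '/'))

theorem pv_find_go_mem (cs : List Char) (k : Nat) (h : '/' ∈ cs) :
    PySem.Chars.find.go ['/'] cs k = (k : Int) + (cs.takeWhile (· ≠ '/')).length := by
  induction cs generalizing k with
  | nil => cases h
  | cons c rest ih =>
    by_cases hc : c = '/'
    · subst hc; simp [PySem.Chars.find.go, List.isPrefixOf]
    · have hr : '/' ∈ rest := by cases h with
        | head => exact absurd rfl hc
        | tail _ h => exact h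
      simp only [PySem.Chars.find.go, List.isPrefixOf, List.takeWhile]
      rw [if_neg (by simp [Ne.symm hc])]
      simp only [show (decide (c ≠ '/')) = true by simp [hc]]
      rw [ih (k + 1) hr]
      simp [List.length_cons]; ring

theorem pv_find_go_not_mem (cs : List Char) (k : Nat) (h : '/' ∉ cs) :
    PySem.Chars.find.go ['/'] cs k = -1 := by
  induction cs generalizing k with
  | nil => simp [PySem.Chars.find.go, List.isEmpty]
  | cons c rest ih =>
    have hc : ¬ (c = '/') := fun hh => h (hh ▸ List.mem_cons_self ..)
    simp only [PySem.Chars.find.go, List.isPrefixOf]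
    rw [if_neg (by simp [Ne.symm hc])]
    exact ih (k + 1) (fun hh => h (List.mem_cons_of_mem _ hh))

-- after the single allowed split has happened (m = 0), go returns the remainder as one piece
theorem pv_split_go_zero (fuel : Nat) (rest : List Char) (acc : List (List Char)) :
    PySem.Chars.splitOnMax.go ['/'] fuel 0 rest [] acc = (rest :: acc).reverse := by
  cases fuel with
  | zero => simp [PySem.Chars.splitOnMax.go]
  | succ fuel => cases rest with
    | nil => simp [PySem.Chars.splitOnMax.go]
    | cons c r => simp [PySem.Chars.splitOnMax.go]

theorem pv_split_go (fuel : Nat) (cs cur : List Char) (acc : List (List Char)) (hf : cs.length < fuel)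
    (h : '/' ∈ cs) :
    PySem.Chars.splitOnMax.go ['/'] fuel 1 cs cur acc =
      acc.reverse ++ [cur.reverse ++ cs.takeWhile (· ≠ '/'), (cs.dropWhile (· ≠ '/')).tail] := by
  induction fuel generalizing cs cur acc with
  | zero => omega
  | succ fuel ih =>
    cases cs with
    | nil => cases h
    | cons c rest =>
      by_cases hc : c = '/'
      · subst hc
        simp only [PySem.Chars.splitOnMax.go]
        rw [if_neg (one_ne_zero), if_pos (by simp [List.isPrefixOf])]
        rw [pv_split_go_zero]
        simp [List.takeWhile, List.dropWhile]
      · have hr : '/' ∈ rest := by cases h with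
          | head => exact absurd rfl hc
          | tail _ h => exact h
        have hlt : rest.length < fuel := by simp at hf; omega
        simp only [PySem.Chars.splitOnMax.go, List.isPrefixOf]
        rw [if_neg (one_ne_zero), if_neg (by simp [Ne.symm hc])]
        rw [ih rest (c :: cur) acc hlt hr]
        simp [List.takeWhile, List.dropWhile, hc]

theorem pv_topA (p : String) (h : '/' ∈ p.toList) :
    ((PySem.Str.splitMax? p "/" 1).getD []).headD "" = pvTop p := by
  have h1 : PySem.Chars.splitOnMax p.toList ['/'] 1 =
      [p.toList.takeWhile (· ≠ '/'), (p.toList.dropWhile (· ≠ '/')).tail] := by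
    unfold PySem.Chars.splitOnMax
    rw [if_neg (by omega)]
    rw [show (1 : Int).toNat = 1 from rfl]
    rw [pv_split_go _ _ _ _ (by omega) h]
    simp
  simp [PySem.Str.splitMax?, PySem.Chars.splitMax?, pvTop, h1]

theorem pv_find_mem (p : String) (h : '/' ∈ p.toList) :
    PySem.Str.find p "/" = ((p.toList.takeWhile (· ≠ '/')).length : Int) := by
  show PySem.Chars.find p.toList "/".toList = _
  rw [show ("/" : String).toList = ['/'] from rfl]
  unfold PySem.Chars.find
  rw [pv_find_go_mem _ _ h]; simp

theorem pv_find_not_mem (p : String) (h : '/' ∉ p.toList) :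
    PySem.Str.find p "/" = -1 := by
  show PySem.Chars.find p.toList "/".toList = _
  rw [show ("/" : String).toList = ['/'] from rfl]
  unfold PySem.Chars.find
  exact pv_find_go_not_mem _ _ h

theorem pv_isIn (p : String) : PySem.Str.isIn "/" p = true ↔ '/' ∈ p.toList := by
  have : PySem.Str.isIn "/" p = (PySem.Str.find p "/" != -1) := rfl
  rw [this]
  by_cases h : '/' ∈ p.toList
  · rw [pv_find_mem p h]; simp [h]
  · rw [pv_find_not_mem p h]; simp [h]

-- ===== Set lemmas =====
theorem pv_foldl_add_ne_nil {α : Type} [BEq α] (l : List α) (s : PySem.Set α) (hs : s ≠ []) :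
    l.foldl PySem.Set.add s ≠ [] := by
  induction l generalizing s with
  | nil => exact hs
  | cons x xs ih =>
    refine ih _ ?_
    unfold PySem.Set.add
    split
    · exact hs
    · simp

theorem pv_ofList_eq_nil {α : Type} [BEq α] (l : List α) :
    PySem.Set.ofList l = [] ↔ l = [] := by
  cases l with
  | nil => simp [PySem.Set.ofList, PySem.Set.empty]
  | cons x xs =>
    simp only [PySem.Set.ofList, List.foldl]
    constructor
    · intro h
      exact absurd h (pv_foldl_add_ne_nil xs _ (by simp [PySem.Set.add, PySem.Set.empty, PySem.Set.contains]))
    · intro h; cases h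

theorem pv_foldl_add_const {α : Type} [BEq α] [LawfulBEq α] (a : α) (l : List α)
    (hl : ∀ x ∈ l, x = a) : l.foldl PySem.Set.add [a] = [a] := by
  induction l with
  | nil => rfl
  | cons x xs ih =>
    have hx := hl x (List.mem_cons_self ..)
    subst hx
    simp only [List.foldl]
    have : PySem.Set.add [x] x = [x] := by
      simp [PySem.Set.add, PySem.Set.contains]
    rw [this]
    exact ih (fun y hy => hl y (List.mem_cons_of_mem _ hy))

theorem pv_ofList_singleton {α : Type} [BEq α] [LawfulBEq α] (a : α) (l : List α)
    (h0 : l ≠ []) (hl : ∀ x ∈ l, x = a) : PySem.Set.ofList l = [a] := by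
  cases l with
  | nil => exact absurd rfl h0
  | cons x xs =>
    have hx := hl x (List.mem_cons_self ..)
    subst hx
    simp only [PySem.Set.ofList, List.foldl]
    have : PySem.Set.add PySem.Set.empty x = [x] := by
      simp [PySem.Set.add, PySem.Set.empty, PySem.Set.contains]
    rw [this]
    exact pv_foldl_add_const x xs (fun y hy => hl y (List.mem_cons_of_mem _ hy))

theorem pv_len_one {α : Type} [BEq α] [LawfulBEq α] (l : List α)
    (h : PySem.Set.len (PySem.Set.ofList l) = 1) :
    ∃ a, PySem.Set.ofList l = [a] ∧ ∀ x ∈ l, x = a := by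
  have hlen : (PySem.Set.ofList l).length = 1 := by
    simp [PySem.Set.len] at h; exact_mod_cast h
  obtain ⟨a, ha⟩ := List.length_eq_one_iff.mp hlen
  refine ⟨a, ha, fun x hx => ?_⟩
  have : x ∈ PySem.Set.ofList l := (PySem.Set.mem_ofList l x).mpr hx
  rw [ha] at this
  simpa using this

-- ===== lcp lemmas =====
theorem pvLcp_prefix_left (a b : List Char) : pvLcp a b <+: a := by
  induction a generalizing b with
  | nil => cases b <;> simp [pvLcp]
  | cons x xs ih =>
    cases b with
    | nil => simp [pvLcp]
    | cons y ys =>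
      by_cases h : x = y
      · simpa [pvLcp, h] using ih ys
      · simp [pvLcp, h]

theorem pvLcp_prefix_right (a b : List Char) : pvLcp a b <+: b := by
  induction a generalizing b with
  | nil => cases b <;> simp [pvLcp]
  | cons x xs ih =>
    cases b with
    | nil => simp [pvLcp]
    | cons y ys =>
      by_cases h : x = y
      · subst h; simpa [pvLcp] using ih ys
      · simp [pvLcp, h]

theorem pvLcp_greatest (c a b : List Char) (ha : c <+: a) (hb : c <+: b) :
    c <+: pvLcp a b := by
  induction c generalizing a b with
  | nil => simp
  | cons z zs ih =>
    obtain ⟨u, hu⟩ := ha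
    obtain ⟨v, hv⟩ := hb
    subst hu; subst hv
    simpa [pvLcp] using ih (zs ++ u) (zs ++ v) ⟨u, rfl⟩ ⟨v, rfl⟩

-- the fold of Source B computes a common prefix of the accumulator and every element …
theorem pv_fold_common (rest : List String) (acc : String) :
    (rest.foldl (fun cp p => String.ofList (pvLcp cp.toList p.toList)) acc).toList <+: acc.toList ∧
    ∀ p ∈ rest,
      (rest.foldl (fun cp p => String.ofList (pvLcp cp.toList p.toList)) acc).toList <+: p.toList := by
  induction rest generalizing acc with
  | nil => simp
  | cons q qs ih =>
    simp only [List.foldl]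
    obtain ⟨h1, h2⟩ := ih (String.ofList (pvLcp acc.toList q.toList))
    simp only [String.toList_ofList] at h1
    refine ⟨h1.trans (pvLcp_prefix_left _ _), fun p hp => ?_⟩
    rcases List.mem_cons.mp hp with hp | hp
    · exact hp ▸ h1.trans (pvLcp_prefix_right _ _)
    · exact h2 p hp

-- … and the longest one: any common prefix is a prefix of the fold's result
theorem pv_fold_greatest (rest : List String) (acc : String) (c : List Char)
    (hacc : c <+: acc.toList) (hall : ∀ p ∈ rest, c <+: p.toList) :
    c <+: (rest.foldl (fun cp p => String.ofList (pvLcp cp.toList p.toList)) acc).toList := by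
  induction rest generalizing acc with
  | nil => exact hacc
  | cons q qs ih =>
    simp only [List.foldl]
    refine ih (String.ofList (pvLcp acc.toList q.toList)) ?_
      (fun p hp => hall p (List.mem_cons_of_mem _ hp))
    simpa using pvLcp_greatest c _ _ hacc (hall q (List.mem_cons_self ..))

theorem pv_no_slash_takeWhile (l : List Char) : '/' ∉ l.takeWhile (· ≠ '/') := by
  intro h
  have := List.mem_takeWhile_imp h
  simp at this

theorem pv_slash_split (l : List Char) (h : '/' ∈ l) :
    l = l.takeWhile (· ≠ '/') ++ '/' :: (l.dropWhile (· ≠ '/')).tail := by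
  induction l with
  | nil => cases h
  | cons c rest ih =>
    by_cases hc : c = '/'
    · subst hc; simp [List.takeWhile, List.dropWhile]
    · have hr : '/' ∈ rest := by cases h with
        | head => exact absurd rfl hc
        | tail _ h => exact h
      simp only [List.takeWhile, List.dropWhile, show (decide (c ≠ '/')) = true by simp [hc]]
      simpa using ih hr

theorem pv_takeWhile_of_slash_append (t s : List Char) (ht : '/' ∉ t) :
    (t ++ '/' :: s).takeWhile (· ≠ '/') = t := by
  induction t with
  | nil => simp
  | cons c r ih =>
    have hc : ¬ (c = '/') := fun hh => ht (hh ▸ List.mem_cons_self ..)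
    simp only [List.cons_append, List.takeWhile, show (decide (c ≠ '/')) = true by simp [hc]]
    rw [ih (fun hh => ht (List.mem_cons_of_mem _ hh))]

-- the single-element prefix relation t++['/'] <+: q pins q's top-level component
theorem pv_top_of_prefix (q : String) (t : List Char) (ht : '/' ∉ t)
    (h : t ++ ['/'] <+: q.toList) : '/' ∈ q.toList ∧ pvTop q = String.ofList t := by
  obtain ⟨u, hu⟩ := h
  have hq : q.toList = t ++ '/' :: u := by rw [← hu]; simp
  constructor
  · rw [hq]; simp
  · unfold pvTop; rw [hq, pv_takeWhile_of_slash_append t u ht]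

theorem pv_main (filename : String) (all_names : List String) :
    strip_common_prefix_py filename all_names = strip_common_prefix_py_alt filename all_names := by
  unfold strip_common_prefix_py strip_common_prefix_py_alt
  cases hp : all_names.filter (fun n => !(PySem.Str.endswith n "/")) with
  | nil => simp
  | cons p0 rest =>
    simp only []
    rw [if_neg (by simp)]
    set F := fun (cp : String) (p : String) => String.ofList (pvLcp cp.toList p.toList) with hF
    set cpS := rest.foldl F p0 with hcpS
    obtain ⟨hcp_acc, hcp_rest⟩ := pv_fold_common rest p0
    rw [← hF, ← hcpS] at hcp_acc hcp_rest
    have hcp_all : ∀ q ∈ p0 :: rest, cpS.toList <+: q.toList := by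
      intro q hq
      rcases List.mem_cons.mp hq with hq | hq
      · exact hq ▸ hcp_acc
      · exact hcp_rest q hq
    by_cases hall : ∀ q ∈ p0 :: rest, '/' ∈ q.toList ∧ pvTop q = pvTop p0
    · -- stripping happens on both sides, with the same common string
      have hp0 := hall p0 (List.mem_cons_self ..)
      set t := p0.toList.takeWhile (· ≠ '/') with htdef
      have htns : '/' ∉ t := pv_no_slash_takeWhile p0.toList
      -- t ++ ['/'] is a common prefix of every part
      have hpre_each : ∀ q ∈ p0 :: rest, t ++ ['/'] <+: q.toList := by
        intro q hq
        obtain ⟨hqs, hqt⟩ := hall q hq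
        have hsplit := pv_slash_split q.toList hqs
        have hqtop : q.toList.takeWhile (· ≠ '/') = t := by
          have h2 := congrArg String.toList hqt
          simp only [pvTop, String.toList_ofList] at h2
          exact h2.trans htdef.symm
        refine ⟨(q.toList.dropWhile (· ≠ '/')).tail, ?_⟩
        rw [← hqtop]; simpa using hsplit.symm
      have hpre_cp : t ++ ['/'] <+: cpS.toList := by
        rw [hcpS, hF]
        exact pv_fold_greatest rest p0 _ (by simpa using hpre_each p0 (List.mem_cons_self ..))
          (fun p hp => hpre_each p (List.mem_cons_of_mem _ hp))
      obtain ⟨u, hu⟩ := hpre_cp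
      have hcpL : cpS.toList = t ++ '/' :: u := by rw [← hu]; simp
      have hcp_slash : '/' ∈ cpS.toList := by rw [hcpL]; simp
      have hfind : PySem.Str.find cpS "/" = (t.length : Int) := by
        rw [pv_find_mem cpS hcp_slash, hcpL, pv_takeWhile_of_slash_append t u htns]
      -- B's branch condition and common string
      have hcond : (PySem.Str.find cpS "/" != -1) = true := by
        rw [hfind]; simp
      have hcommonB : PySem.Str.slice cpS none (some (PySem.Str.find cpS "/" + 1)) =
          pvTop p0 ++ "/" := by
        apply String.toList_injective
        simp only [PySem.Str.slice, String.toList_ofList, String.toList_append]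
        rw [hfind]
        rw [show (t.length : Int) + 1 = ((t.length + 1 : Nat) : Int) by push_cast; ring]
        rw [PySem.Chars.slice_eq_listSlice, PySem.List.slice_to_natCast, hcpL]
        have hpv : (pvTop p0).toList = t := by
          simp only [pvTop, String.toList_ofList]
          exact htdef.symm
        rw [hpv, show ("/" : String).toList = ['/'] from rfl]
        rw [show t ++ '/' :: u = t ++ ['/'] ++ u by simp]
        rw [List.take_left']
        simp
      -- A's set computations under hall
      have hslash : ∀ q ∈ p0 :: rest, '/' ∈ q.toList := fun q hq => (hall q hq).1
      have hfs : (p0 :: rest).filter (fun p => PySem.Str.isIn "/" p) = p0 :: rest :=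
        List.filter_eq_self.mpr (fun p hp => (pv_isIn p).mpr (hslash p hp))
      have hfn : (p0 :: rest).filter (fun p => !(PySem.Str.isIn "/" p)) = [] := by
        apply List.filter_eq_nil_iff.mpr
        intro p hp hcon
        rw [(pv_isIn p).mpr (hslash p hp)] at hcon
        simp at hcon
      have hset : PySem.Set.ofList ((p0 :: rest).map
          (fun p => ((PySem.Str.splitMax? p "/" 1).getD []).headD "")) = [pvTop p0] := by
        apply pv_ofList_singleton
        · simp
        · intro x hx
          obtain ⟨p, hpmem, hpx⟩ := List.mem_map.mp hx
          rw [← hpx, pv_topA p (hslash p hpmem), (hall p hpmem).2]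
      rw [hfs, hfn, hset]
      rw [if_pos ⟨by simp [PySem.Set.len], by simp [PySem.Set.ofList, PySem.Set.empty]⟩]
      simp only [List.headD_cons, hcond, if_true, hcommonB]
    · -- no single common top directory: both sides return filename unchanged
      have hcp_no_slash : '/' ∉ cpS.toList := by
        intro hs
        set t := cpS.toList.takeWhile (· ≠ '/') with htdef
        have htns : '/' ∉ t := pv_no_slash_takeWhile cpS.toList
        have hpre : t ++ ['/'] <+: cpS.toList := by
          refine ⟨(cpS.toList.dropWhile (· ≠ '/')).tail, ?_⟩
          have := pv_slash_split cpS.toList hs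
          rw [htdef]; simpa using this.symm
        have htops : ∀ q ∈ p0 :: rest, '/' ∈ q.toList ∧ pvTop q = String.ofList t :=
          fun q hq => pv_top_of_prefix q t htns (hpre.trans (hcp_all q hq))
        refine hall (fun q hq => ⟨(htops q hq).1, ?_⟩)
        rw [(htops q hq).2, (htops p0 (List.mem_cons_self ..)).2]
      have hfind : PySem.Str.find cpS "/" = -1 := pv_find_not_mem cpS hcp_no_slash
      have hcond : (PySem.Str.find cpS "/" != -1) = false := by rw [hfind]; simp
      rw [hcond]
      simp only [Bool.false_eq_true, if_false]
      -- A's condition fails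
      have hA : ¬ (PySem.Set.len (PySem.Set.ofList
          (((p0 :: rest).filter (fun p => PySem.Str.isIn "/" p)).map
            (fun p => ((PySem.Str.splitMax? p "/" 1).getD []).headD ""))) = 1 ∧
          PySem.Set.ofList ((p0 :: rest).filter (fun p => !(PySem.Str.isIn "/" p))) = []) := by
        rintro ⟨hlen, hroots⟩
        have hfn : (p0 :: rest).filter (fun p => !(PySem.Str.isIn "/" p)) = [] :=
          (pv_ofList_eq_nil _).mp hroots
        have hslash : ∀ q ∈ p0 :: rest, '/' ∈ q.toList := by
          intro q hq
          by_contra hqs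
          have : q ∈ (p0 :: rest).filter (fun p => !(PySem.Str.isIn "/" p)) := by
            apply List.mem_filter.mpr
            refine ⟨hq, ?_⟩
            simp only [Bool.not_eq_eq_eq_not, Bool.not_true]
            exact Bool.eq_false_iff.mpr (fun hcon => hqs ((pv_isIn q).mp hcon))
          rw [hfn] at this
          cases this
        have hfs : (p0 :: rest).filter (fun p => PySem.Str.isIn "/" p) = p0 :: rest :=
          List.filter_eq_self.mpr (fun p hpm => (pv_isIn p).mpr (hslash p hpm))
        rw [hfs] at hlen
        obtain ⟨a, _, ha⟩ := pv_len_one _ hlen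
        refine hall (fun q hq => ⟨hslash q hq, ?_⟩)
        have hq1 : ((PySem.Str.splitMax? q "/" 1).getD []).headD "" = a :=
          ha _ (List.mem_map.mpr ⟨q, hq, rfl⟩)
        have hq2 : ((PySem.Str.splitMax? p0 "/" 1).getD []).headD "" = a :=
          ha _ (List.mem_map.mpr ⟨p0, List.mem_cons_self .., rfl⟩)
        rw [pv_topA q (hslash q hq)] at hq1
        rw [pv_topA p0 (hslash p0 (List.mem_cons_self ..))] at hq2
        rw [hq1, hq2]
      rw [if_neg hA]

-- ===== VERDICT (by name: the statement is the Claim_ definition above) =====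
theorem strip_common_prefix_py_spec : Claim_equal_strip_common_prefix_py := by
  intro filename all_names _
  unfold Spec_strip_common_prefix_py
  exact pv_main filename all_names
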